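-- pv_equiv track=rewrite | github.com/jakubmr/euler-hamilton-cycle | main.py | isEuler
-- ===== SOURCE A (Python) =====
-- def transposition(t):
--     t1 = []
--     for i in range(len(t)):
--         t2 = []
--         for j in range(len(t)):
--             t2.append(t[j][i])
--         t1.append(t2)
--     return t1
--
-- def isEuler(t):
--     a = t[:]
--     b = transposition(t)
--     for i in a:
--         i = list(filter(lambda x: x==1, i))
--         if len(i) % 2 != 0:
--             return False
--     for i in b:
--         i = list(filter(lambda x: x==1, i))
--         if len(i) % 2 != 0:
--             return False
--     return True
-- ===== SOURCE B (Python) =====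
-- def isEuler(t):
--     n = len(t)
--     col = [0] * n
--     for row in t:
--         if sum(1 for x in row if x == 1) % 2 != 0:
--             return False
--         col = [col[i] + (row[i] == 1) for i in range(n)]
--     return all(c % 2 == 0 for c in col)
-- ===== Notes on version B (the rewrite author's own statement) =====
-- stated objective: faster
-- what changed: B replaces A's materialized transpose plus two filter passes with a single pass over the rows that checks each row's parity and carries running column counters, checking the counters' parity at the end (constant-factor: no transpose list-of-lists is built and rows can short-circuit).
import Mathlib
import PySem

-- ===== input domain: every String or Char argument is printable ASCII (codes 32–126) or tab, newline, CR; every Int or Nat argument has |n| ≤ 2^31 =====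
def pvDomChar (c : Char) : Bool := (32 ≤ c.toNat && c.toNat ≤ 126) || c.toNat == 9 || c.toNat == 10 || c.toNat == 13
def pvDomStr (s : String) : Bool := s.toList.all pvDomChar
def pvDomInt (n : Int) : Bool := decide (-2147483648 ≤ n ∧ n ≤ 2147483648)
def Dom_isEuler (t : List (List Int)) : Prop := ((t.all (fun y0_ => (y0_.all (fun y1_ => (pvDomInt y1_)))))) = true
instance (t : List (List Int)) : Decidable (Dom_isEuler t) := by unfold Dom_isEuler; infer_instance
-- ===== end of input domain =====

-- B makes one pass over the rows, keeping running column counters (zip), instead of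
-- materializing the transpose; equal return values proved on Pre_ (every row at least len(t) long).

-- ===== PORT A =====
-- transposition(t): t1[i][j] = t[j][i] for i,j < len(t); t[j][i] raises IndexError for a
-- short row (pyGet? = none), excluded by Pre_isEuler, so the .getD 0 is exact on Pre_.
def transpositionA (t : List (List Int)) : List (List Int) :=
  (PySem.List.pyRange 0 t.length 1).map (fun i =>
    (PySem.List.pyRange 0 t.length 1).map (fun j =>
      (PySem.List.pyGet? (PySem.List.pyGetD t j []) i).getD 0))

-- the two identical 'for i in …: if len(filter(==1, i)) % 2 != 0: return False' loops
def checkRowsA : List (List Int) → Bool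
  | [] => true
  | r :: rest =>
      if (r.filter (fun x => x == 1)).length % 2 ≠ 0 then false else checkRowsA rest

def isEuler (t : List (List Int)) : Bool :=
  let a := t
  let b := transpositionA t
  checkRowsA a && checkRowsA b

-- ===== PORT B =====
-- sum(1 for x in row if x == 1)
def countOnesB (r : List Int) : Int :=
  r.foldl (fun acc x => if x == 1 then acc + 1 else acc) 0

-- col = [col[i] + (row[i] == 1) for i in range(n)]; row[i] raises IndexError on a short
-- row (pyGet? = none), excluded by Pre_isEuler, so the .getD 0 is exact on Pre_.
def stepB (n : Nat) (col row : List Int) : List Int :=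
  (List.range n).map (fun i =>
    col.getD i 0 + (if (PySem.List.pyGet? row (Nat.cast i)).getD 0 == 1 then 1 else 0))

-- the single for-loop over rows carrying the running column counters col
def goB (n : Nat) : List (List Int) → List Int → Bool
  | [], col => col.all (fun c => c % 2 == 0)
  | row :: rest, col =>
      if countOnesB row % 2 ≠ 0 then false
      else goB n rest (stepB n col row)

def isEuler_alt (t : List (List Int)) : Bool :=
  goB t.length t (List.replicate t.length 0)

-- ===== PRECONDITION & SPEC =====
-- A's transposition reads t[j][i] for all i, j < len(t): any row shorter than len(t)
-- makes A raise IndexError, so exactly those inputs are excluded.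
def Pre_isEuler (t : List (List Int)) : Prop := ∀ r ∈ t, t.length ≤ r.length
instance (t : List (List Int)) : Decidable (Pre_isEuler t) := by unfold Pre_isEuler; infer_instance

def pvWitness_isEuler : List (List Int) := [[1, 1], [1, 1]]

def Spec_isEuler (t : List (List Int)) (out : Bool) : Prop := out = isEuler_alt t
instance (t : List (List Int)) (out : Bool) : Decidable (Spec_isEuler t out) := by unfold Spec_isEuler; infer_instance

-- ===== CLAIM (what is proved, stated in full; the proofs are below) =====
def Claim_equal_isEuler : Prop := ∀ (t : List (List Int)), Dom_isEuler t → Pre_isEuler t → Spec_isEuler t (isEuler t)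

-- ===== LEMMAS AND PROOFS =====

theorem checkRowsA_eq_all (rs : List (List Int)) :
    checkRowsA rs = rs.all (fun r => r.countP (fun x => x == 1) % 2 == 0) := by
  induction rs with
  | nil => rfl
  | cons r rest ih =>
      simp only [checkRowsA, List.all_cons, ih, List.countP_eq_length_filter]
      by_cases h : (r.filter (fun x => x == 1)).length % 2 = 0 <;> simp [h]

theorem countOnesB_eq (r : List Int) :
    countOnesB r = (r.countP (fun x => x == 1) : Int) := by
  have aux : ∀ (l : List Int) (acc : Int),
      l.foldl (fun acc x => if x == 1 then acc + 1 else acc) acc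
        = acc + (l.countP (fun x => x == 1) : Int) := by
    intro l
    induction l with
    | nil => intro acc; simp
    | cons x xs ih =>
        intro acc
        simp only [List.foldl_cons, List.countP_cons, ih]
        by_cases h : x = 1 <;> simp [h] <;> try ring
  simpa [countOnesB] using aux r 0

theorem map_getD_range {α : Type} (l : List α) (d : α) :
    (List.range l.length).map (fun j => l.getD j d) = l := by
  induction l with
  | nil => rfl
  | cons x xs ih =>
      simp only [List.length_cons, List.range_succ_eq_map, List.map_cons, List.map_map]
      simpa using ih

theorem getD_map_range' {α : Type} (f : Nat → α) (n i : Nat) (d : α) (hi : i < n) :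
    ((List.range n).map f).getD i d = f i := by
  rw [List.getD_eq_getElem?_getD, List.getElem?_map, List.getElem?_range hi]
  rfl

theorem stepB_getD (n : Nat) (col row : List Int) (i : Nat) (hi : i < n) :
    (stepB n col row).getD i 0
      = col.getD i 0 + (if row.getD i 0 == 1 then 1 else 0) := by
  rw [stepB, getD_map_range' _ n i 0 hi, PySem.List.pyGet?_natCast]
  simp [List.getD]

theorem stepB_length (n : Nat) (col row : List Int) : (stepB n col row).length = n := by
  simp [stepB]

theorem foldl_stepB_length (n : Nat) (rows : List (List Int)) :
    ∀ (col : List Int), col.length = n → (rows.foldl (stepB n) col).length = n := by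
  induction rows with
  | nil => intro col h; simpa using h
  | cons row rest ih =>
      intro col _
      simpa [List.foldl_cons] using ih (stepB n col row) (stepB_length n col row)

theorem foldl_stepB_getD (n : Nat) (rows : List (List Int)) :
    ∀ (col : List Int) (i : Nat), i < n →
      (rows.foldl (stepB n) col).getD i 0
        = col.getD i 0 + (rows.countP (fun r => r.getD i 0 == 1) : Int) := by
  induction rows with
  | nil => intro col i _; simp
  | cons row rest ih =>
      intro col i hi
      simp only [List.foldl_cons, List.countP_cons]
      rw [ih (stepB n col row) i hi, stepB_getD n col row i hi]
      by_cases hx : row.getD i 0 = 1 <;> simp <;> try ring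

theorem goB_eq (n : Nat) (rows : List (List Int)) :
    ∀ (col : List Int),
      goB n rows col
        = (rows.all (fun r => r.countP (fun x => x == 1) % 2 == 0)
            && (rows.foldl (stepB n) col).all (fun c => c % 2 == 0)) := by
  induction rows with
  | nil => intro col; simp [goB]
  | cons row rest ih =>
      intro col
      by_cases h' : row.countP (fun x => x == 1) % 2 = 0
      · have h : ¬ (countOnesB row % 2 ≠ 0) := by rw [countOnesB_eq]; omega
        rw [goB, if_neg h, ih (stepB n col row)]
        simp [h', List.foldl_cons]
      · have h : countOnesB row % 2 ≠ 0 := by rw [countOnesB_eq]; omega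
        rw [goB, if_pos h]
        simp [h']

theorem all_congr_mem {α : Type} (l : List α) (f g : α → Bool)
    (h : ∀ x ∈ l, f x = g x) : l.all f = l.all g := by
  induction l with
  | nil => rfl
  | cons x xs ih =>
      simp only [List.all_cons, h x (by simp), ih (fun y hy => h y (by simp [hy]))]

theorem natInt_parity (k : Nat) : (k % 2 == 0) = (((k : Int) % 2 == 0)) := by
  rw [Bool.eq_iff_iff, beq_iff_eq, beq_iff_eq]
  omega

theorem col_list_eq (t : List (List Int)) (i : Nat) :
    ((List.range t.length).map (fun k => (Nat.cast k : Int))).map (fun j =>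
        (PySem.List.pyGet? (PySem.List.pyGetD t j []) (i : Int)).getD 0)
      = t.map (fun r => r.getD i 0) := by
  rw [List.map_map]
  conv_rhs => rw [← map_getD_range t [], List.map_map]
  apply List.map_congr_left
  intro j _
  simp only [Function.comp]
  rw [PySem.List.pyGetD_natCast, PySem.List.pyGet?_natCast]
  simp [List.getD]

-- the column checks of the two programs agree (this is the loop interchange)
theorem cols_eq (t : List (List Int)) :
    checkRowsA (transpositionA t)
      = (t.foldl (stepB t.length) (List.replicate t.length 0)).all (fun c => c % 2 == 0) := by
  have hflen : (t.foldl (stepB t.length) (List.replicate t.length 0)).length = t.length :=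
    foldl_stepB_length t.length t _ (by simp)
  -- left side: all over range of column counts
  rw [checkRowsA_eq_all, transpositionA, List.all_map]
  rw [show ((t.length : Int)) = (((t.length : Nat) : Int)) from rfl,
      PySem.List.pyRange_zero_natCast, List.all_map]
  -- right side: rewrite the final accumulator as a map over range
  conv_rhs => rw [← map_getD_range (t.foldl (stepB t.length) (List.replicate t.length 0)) 0,
                  hflen, List.all_map]
  apply all_congr_mem
  intro i hi
  have hi' : i < t.length := List.mem_range.mp hi
  have hentry : (t.foldl (stepB t.length) (List.replicate t.length 0)).getD i 0
      = (t.countP (fun r => r.getD i 0 == 1) : Int) := by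
    rw [foldl_stepB_getD t.length t _ i hi']
    simp
  simp only [Function.comp]
  rw [col_list_eq t i, List.countP_map, hentry]
  have hc : t.countP ((fun x => x == 1) ∘ fun r => r.getD i 0)
      = t.countP (fun r => r.getD i 0 == 1) := by
    apply List.countP_congr; intro r _; simp [Function.comp]
  rw [hc]
  exact natInt_parity _

-- ===== VERDICT (by name: the statement is the Claim_ definition above) =====
theorem isEuler_spec : Claim_equal_isEuler := by
  intro t _ _
  unfold Spec_isEuler isEuler isEuler_alt
  show (checkRowsA t && checkRowsA (transpositionA t))
      = goB t.length t (List.replicate t.length 0)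
  rw [goB_eq t.length t (List.replicate t.length 0), ← cols_eq t, checkRowsA_eq_all]
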